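-- pv_equiv track=rewrite | github.com/firgon/syllabes | main.py | get_score_nb_letters
-- ===== SOURCE A (Python) =====
-- def get_score_nb_letters(proposition: str,
--                          word_to_find: str,
--                          nb: int) -> int:
--     """function to check how many letters are correct in the proposition
--     :param proposition: str given by user (lowercase)
--     :param word_to_find: str from game (lowercase)
--     :param nb: size of the slices to check
--
--     :returns score: 1pt by correct slice
--     """
--     score = 0
--     chars = set(
--         proposition[x:x + nb] for x in range(0, len(proposition) - nb + 1))
--
--     for char in chars:
--         nb_in_proposition = proposition.count(char)
--         nb_in_word_to_find = word_to_find.count(char)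
--         matching_chars = min(nb_in_word_to_find, nb_in_proposition)
--
--         score += matching_chars
--
--     return score
-- ===== SOURCE B (Python) =====
-- def _greedy_counts(s, nb):
--     """Non-overlapping occurrence count per distinct nb-gram, in one pass:
--     a gram counts at position x only if x is at or past the end of its
--     previous counted occurrence (same greedy rule as str.count)."""
--     counts = {}
--     next_free = {}
--     for x in range(0, len(s) - nb + 1):
--         gram = s[x:x + nb]
--         if x >= next_free.get(gram, 0):
--             counts[gram] = counts.get(gram, 0) + 1
--             next_free[gram] = x + nb
--     return counts
--
--
-- def get_score_nb_letters(proposition: str,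
--                          word_to_find: str,
--                          nb: int) -> int:
--     counts_prop = _greedy_counts(proposition, nb)
--     counts_word = _greedy_counts(word_to_find, nb)
--     score = 0
--     for gram, c in counts_prop.items():
--         score += min(c, counts_word.get(gram, 0))
--     return score
-- ===== Notes on version B (the rewrite author's own statement) =====
-- stated objective: faster
-- what changed: Replaces the set of n-grams plus a full str.count scan of both strings per distinct n-gram (O(L^2)) with a single left-to-right pass per string that maintains a dict of per-gram counts and next-allowed-match positions, reproducing str.count's greedy non-overlapping rule for all grams at once.
-- outside the precondition, e.g. on get_score_nb_letters('ab', 'abc', -1): A returns 4, B returns 3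
import Mathlib
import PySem

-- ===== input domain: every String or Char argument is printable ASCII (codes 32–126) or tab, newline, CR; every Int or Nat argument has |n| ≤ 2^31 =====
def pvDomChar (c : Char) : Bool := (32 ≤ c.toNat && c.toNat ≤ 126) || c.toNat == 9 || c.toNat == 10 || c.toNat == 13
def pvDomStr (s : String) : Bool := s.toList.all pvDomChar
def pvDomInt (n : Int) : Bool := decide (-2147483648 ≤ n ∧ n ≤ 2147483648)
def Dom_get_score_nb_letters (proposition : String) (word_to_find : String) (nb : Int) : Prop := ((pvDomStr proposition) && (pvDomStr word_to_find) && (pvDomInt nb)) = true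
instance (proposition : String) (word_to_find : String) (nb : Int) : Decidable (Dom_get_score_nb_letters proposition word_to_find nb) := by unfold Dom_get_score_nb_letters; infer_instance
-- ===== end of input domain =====

-- B replaces A's per-distinct-n-gram str.count scans of both strings with one greedy
-- left-to-right pass per string that maintains a dict of counts and next-allowed-match
-- positions (objective: faster).

-- ===== PORT A =====
def get_score_nb_letters (proposition : String) (word_to_find : String) (nb : Int) : Int :=
  let chars : PySem.Set String :=
    PySem.Set.ofList ((PySem.List.pyRange 0 (PySem.Str.len proposition - nb + 1) 1).map
      (fun x => PySem.Str.slice proposition (some x) (some (x + nb))))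
  List.foldl (fun score char =>
    let nb_in_proposition : Int := PySem.Str.count proposition char
    let nb_in_word_to_find : Int := PySem.Str.count word_to_find char
    let matching_chars : Int := min nb_in_word_to_find nb_in_proposition
    score + matching_chars) 0 chars

-- ===== PORT B =====
-- Source B's helper _greedy_counts: one pass, dicts of per-gram counts / next allowed start
def pvGreedyCounts (s : String) (nb : Int) : PySem.Dict String Int :=
  ((PySem.List.pyRange 0 (PySem.Str.len s - nb + 1) 1).foldl
    (fun (st : PySem.Dict String Int × PySem.Dict String Int) x =>
      let gram := PySem.Str.slice s (some x) (some (x + nb))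
      if st.2.getD gram 0 ≤ x then
        (st.1.insert gram (st.1.getD gram 0 + 1), st.2.insert gram (x + nb))
      else st)
    (PySem.Dict.empty, PySem.Dict.empty)).1

def get_score_nb_letters_alt (proposition : String) (word_to_find : String) (nb : Int) : Int :=
  let counts_prop := pvGreedyCounts proposition nb
  let counts_word := pvGreedyCounts word_to_find nb
  counts_prop.items.foldl (fun score gc => score + min gc.2 (counts_word.getD gc.1 0)) 0

-- ===== PRECONDITION & SPEC =====
-- Pre_ excludes nb < 0 — a negative slice size, outside the function's natural domain
-- (there A's value comes from counting the empty slices a negative width produces).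
def Pre_get_score_nb_letters (proposition : String) (word_to_find : String) (nb : Int) : Prop := 0 ≤ nb
instance (proposition : String) (word_to_find : String) (nb : Int) : Decidable (Pre_get_score_nb_letters proposition word_to_find nb) := by unfold Pre_get_score_nb_letters; infer_instance
def pvWitness_get_score_nb_letters : String × String × Int := ("abab", "ba", 2)

def Spec_get_score_nb_letters (proposition : String) (word_to_find : String) (nb : Int) (out : Int) : Prop := out = get_score_nb_letters_alt proposition word_to_find nb
instance (proposition : String) (word_to_find : String) (nb : Int) (out : Int) : Decidable (Spec_get_score_nb_letters proposition word_to_find nb out) := by unfold Spec_get_score_nb_letters; infer_instance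

-- ===== CLAIM (what is proved, stated in full; the proofs are below) =====
def Claim_equal_get_score_nb_letters : Prop := ∀ (proposition : String) (word_to_find : String) (nb : Int), Dom_get_score_nb_letters proposition word_to_find nb → Pre_get_score_nb_letters proposition word_to_find nb → Spec_get_score_nb_letters proposition word_to_find nb (get_score_nb_letters proposition word_to_find nb)

-- ===== LEMMAS AND PROOFS =====

-- greedy non-overlapping count of g in a list, recursing on the list (= str.count for g ≠ [])
def pvCnt (g : List Char) : List Char → Nat
  | [] => 0
  | c :: t => if g.isPrefixOf (c :: t) then pvCnt g (t.drop (g.length - 1)) + 1 else pvCnt g t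
  termination_by l => l.length
  decreasing_by
    all_goals simp

theorem pvCnt_of_short (g : List Char) : ∀ (u : List Char), u.length < g.length → pvCnt g u = 0 := by
  intro u
  induction u with
  | nil => intro _; simp [pvCnt]
  | cons c t ih =>
    intro h
    have hnp : ¬ g.isPrefixOf (c :: t) = true := by
      intro hp
      have := (List.isPrefixOf_iff_prefix.mp hp).length_le
      simp at this h; omega
    rw [pvCnt, if_neg hnp]
    exact ih (by simp at h ⊢; omega)

theorem pvCnt_prefix (g u : List Char) (hg : g ≠ []) (h : g.IsPrefix u) :
    pvCnt g u = pvCnt g (u.drop g.length) + 1 := by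
  match u with
  | [] =>
    exact absurd (List.prefix_nil.mp h) hg
  | c :: t =>
    rw [pvCnt, if_pos (List.isPrefixOf_iff_prefix.mpr h)]
    obtain ⟨m, hm⟩ : ∃ m, g.length = m + 1 := by
      cases hl : g.length with
      | zero => exact absurd (List.length_eq_zero_iff.mp hl) hg
      | succ m => exact ⟨m, rfl⟩
    rw [hm]
    simp

theorem pvCnt_not_prefix (g u : List Char) (h : ¬ g.IsPrefix u) :
    pvCnt g u = pvCnt g u.tail := by
  match u with
  | [] => rfl
  | c :: t =>
    rw [pvCnt, if_neg (by intro hp; exact h (List.isPrefixOf_iff_prefix.mp hp))]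
    rfl

theorem pvCount_go_eq (g : List Char) (hg : g ≠ []) :
    ∀ (fuel : Nat) (l : List Char) (acc : Nat), l.length ≤ fuel →
      PySem.Chars.count.go g fuel l acc = acc + pvCnt g l := by
  intro fuel
  induction fuel with
  | zero =>
    intro l acc h
    have hl : l = [] := List.length_eq_zero_iff.mp (Nat.le_zero.mp h)
    subst hl
    simp [PySem.Chars.count.go, pvCnt]
  | succ f ih =>
    intro l acc h
    match l with
    | [] => simp [PySem.Chars.count.go, pvCnt]
    | c :: t =>
      rw [PySem.Chars.count.go]
      by_cases hp : g.isPrefixOf (c :: t) = true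
      · rw [if_pos hp]
        have hgl : 1 ≤ g.length := by
          cases g with
          | nil => exact absurd rfl hg
          | cons a b => simp
        have hlen : ((c :: t).drop g.length).length ≤ f := by
          simp at h ⊢; omega
        rw [ih _ _ hlen, pvCnt, if_pos hp]
        have : (c :: t).drop g.length = t.drop (g.length - 1) := by
          obtain ⟨m, hm⟩ : ∃ m, g.length = m + 1 := ⟨g.length - 1, by omega⟩
          rw [hm]; simp
        rw [this]; omega
      · rw [if_neg hp]
        rw [ih t acc (by simp at h; omega), pvCnt, if_neg hp]

theorem pvCount_eq_pvCnt (s g : List Char) (hg : g ≠ []) :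
    PySem.Chars.count s g = pvCnt g s := by
  rw [PySem.Chars.count, if_neg (by simpa using hg)]
  rw [pvCount_go_eq g hg s.length s 0 le_rfl]; omega

theorem pvCount_nil (s : List Char) : PySem.Chars.count s [] = s.length + 1 := by
  simp [PySem.Chars.count]

-- the per-gram one-element machine hidden in B's dict pass
def pvSelStep (n : Int) (st : Int × Int) (x : Int) : Int × Int :=
  if st.2 ≤ x then (st.1 + 1, x + n) else st

-- B's loop body with the gram function abstracted out
def pvDStep (G : Int → String) (n : Int)
    (st : PySem.Dict String Int × PySem.Dict String Int) (x : Int) :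
    PySem.Dict String Int × PySem.Dict String Int :=
  if st.2.getD (G x) 0 ≤ x then
    (st.1.insert (G x) (st.1.getD (G x) 0 + 1), st.2.insert (G x) (x + n))
  else st

-- B's dict pass, per gram, is the pvSelStep fold over that gram's positions
theorem pvDictInv (G : Int → String) (n : Int) (xs : List Int)
    (d : PySem.Dict String Int × PySem.Dict String Int) (g : String) :
    ((xs.foldl (pvDStep G n) d).1.getD g 0, (xs.foldl (pvDStep G n) d).2.getD g 0)
      = (xs.filter (fun x => G x == g)).foldl (pvSelStep n) (d.1.getD g 0, d.2.getD g 0) := by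
  induction xs generalizing d with
  | nil => rfl
  | cons x xs ih =>
    rw [List.foldl_cons, List.filter_cons, ih]
    by_cases hfire : d.2.getD (G x) 0 ≤ x
    · by_cases hgram : G x = g
      · subst hgram
        rw [if_pos (by simp : (G x == G x) = true), List.foldl_cons]
        have : pvSelStep n (d.1.getD (G x) 0, d.2.getD (G x) 0) x
            = (d.1.getD (G x) 0 + 1, x + n) := by
          simp [pvSelStep, hfire]
        rw [this]
        simp [pvDStep, hfire, PySem.Dict.getD_insert_self]
      · have hbeq : (G x == g) = false := by simp [hgram]
        rw [hbeq]
        simp only [Bool.false_eq_true, if_false]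
        simp [pvDStep, hfire, PySem.Dict.getD_insert_of_ne _ _ _ (Ne.symm hgram)]
    · by_cases hgram : G x = g
      · subst hgram
        rw [if_pos (by simp : (G x == G x) = true), List.foldl_cons]
        have : pvSelStep n (d.1.getD (G x) 0, d.2.getD (G x) 0) x
            = (d.1.getD (G x) 0, d.2.getD (G x) 0) := by
          simp [pvSelStep, hfire]
        rw [this]
        simp [pvDStep, hfire]
      · have hbeq : (G x == g) = false := by simp [hgram]
        rw [hbeq]
        simp only [Bool.false_eq_true, if_false]
        simp [pvDStep, hfire]

theorem pvDictKeys (G : Int → String) (n : Int) (xs : List Int)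
    (d : PySem.Dict String Int × PySem.Dict String Int)
    (hk : d.1.keys = d.2.keys) (hx : ∀ x ∈ xs, 0 ≤ x) :
    (xs.foldl (pvDStep G n) d).1.keys = PySem.Set.update d.1.keys (xs.map G)
      ∧ (xs.foldl (pvDStep G n) d).2.keys = PySem.Set.update d.1.keys (xs.map G) := by
  induction xs generalizing d with
  | nil => exact ⟨rfl, hk.symm ▸ rfl⟩
  | cons x xs ih =>
    rw [List.foldl_cons, List.map_cons]
    have hx0 : (0 : Int) ≤ x := hx x (List.mem_cons_self)
    have hxs : ∀ y ∈ xs, (0 : Int) ≤ y := fun y hy => hx y (List.mem_cons_of_mem _ hy)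
    by_cases hc : d.2.contains (G x) = true
    · -- key already present: keys unchanged whether or not the branch fires
      have hc1 : d.1.contains (G x) = true := by
        rw [PySem.Dict.contains_iff_mem_keys] at hc ⊢
        rw [hk]; exact hc
      have hadd : PySem.Set.add d.1.keys (G x) = d.1.keys := by
        simp only [PySem.Set.add]
        rw [if_pos (by simpa using (PySem.Dict.contains_iff_mem_keys d.1 (G x)).mp hc1)]
      by_cases hfire : d.2.getD (G x) 0 ≤ x
      · have hstep : pvDStep G n d x
            = (d.1.insert (G x) (d.1.getD (G x) 0 + 1), d.2.insert (G x) (x + n)) := by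
          simp [pvDStep, hfire]
        rw [hstep]
        have h1 := PySem.Dict.keys_insert_of_contains d.1 (d.1.getD (G x) 0 + 1) hc1
        have h2 := PySem.Dict.keys_insert_of_contains d.2 (x + n) hc
        have := ih (d := (d.1.insert (G x) (d.1.getD (G x) 0 + 1), d.2.insert (G x) (x + n)))
          (by simpa [h1, h2] using hk) hxs
        simpa [h1, PySem.Set.update, hadd] using this
      · have hstep : pvDStep G n d x = d := by simp [pvDStep, hfire]
        rw [hstep]
        simpa [PySem.Set.update, hadd] using ih d hk hxs
    · -- fresh key: its next-free default is 0 ≤ x, so the branch fires and appends it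
      have hc' : d.2.contains (G x) = false := by simpa using hc
      have hc1 : d.1.contains (G x) = false := by
        cases h1 : d.1.contains (G x) with
        | false => rfl
        | true =>
          rw [PySem.Dict.contains_iff_mem_keys, hk, ← PySem.Dict.contains_iff_mem_keys] at h1
          rw [h1] at hc'; cases hc'
      have hfire : d.2.getD (G x) 0 ≤ x := by
        rw [PySem.Dict.getD_of_not_contains d.2 0 hc']; exact hx0
      have hstep : pvDStep G n d x
          = (d.1.insert (G x) (d.1.getD (G x) 0 + 1), d.2.insert (G x) (x + n)) := by
        simp [pvDStep, hfire]
      rw [hstep]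
      have h1 := PySem.Dict.keys_insert_of_not_contains d.1 (d.1.getD (G x) 0 + 1) hc1
      have h2 := PySem.Dict.keys_insert_of_not_contains d.2 (x + n) hc'
      have hadd : PySem.Set.add d.1.keys (G x) = d.1.keys ++ [G x] := by
        simp only [PySem.Set.add]
        rw [if_neg]
        intro hmem
        have : (G x) ∈ d.1.keys := by simpa using hmem
        rw [← PySem.Dict.contains_iff_mem_keys] at this
        rw [this] at hc1; cases hc1
      have := ih (d := (d.1.insert (G x) (d.1.getD (G x) 0 + 1), d.2.insert (G x) (x + n)))
        (by simp [h1, h2, hk]) hxs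
      simpa [h1, PySem.Set.update, hadd] using this

theorem pvSel_skip (n : Int) (u : List Nat) (c thr : Int)
    (h : ∀ x ∈ u, (x : Int) < thr) :
    u.foldl (fun (st : Int × Int) (x : Nat) => pvSelStep n st ↑x) (c, thr) = (c, thr) := by
  induction u with
  | nil => rfl
  | cons x u ih =>
    rw [List.foldl_cons]
    have hx := h x List.mem_cons_self
    have : pvSelStep n (c, thr) ↑x = (c, thr) := by
      simp only [pvSelStep]; rw [if_neg (by omega)]
    rw [this]
    exact ih (fun y hy => h y (List.mem_cons_of_mem _ hy))

-- the pvSelStep fold over the ascending occurrence positions of g is greedy counting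
theorem pvGreedyEq (cs g : List Char) (n : Nat) (hn : 1 ≤ n) (hg : g.length = n) :
    ∀ (k j : Nat) (c thr : Int), thr ≤ (j : Int) →
      cs.length + 1 ≤ j + k + n →
      (((List.range' j k).filter (fun x => decide (g <+: cs.drop x))).foldl
          (fun (st : Int × Int) (x : Nat) => pvSelStep (n : Int) st ↑x) (c, thr)).1
        = c + pvCnt g (cs.drop j) := by
  intro k
  induction k using Nat.strong_induction_on with
  | _ k ih =>
    intro j c thr hthr hbound
    match k with
    | 0 =>
      have h0 : pvCnt g (cs.drop j) = 0 :=
        pvCnt_of_short g _ (by rw [List.length_drop]; omega)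
      simp [h0]
    | k + 1 =>
      rw [List.range'_succ, List.filter_cons]
      by_cases hp : g <+: cs.drop j
      · rw [if_pos (by simpa using hp), List.foldl_cons]
        have hfire : pvSelStep (n : Int) (c, thr) ↑j = (c + 1, (j : Int) + n) := by
          simp only [pvSelStep]; rw [if_pos hthr]
        rw [hfire]
        -- split the remaining range at position j + n
        have hm : k = min (n - 1) k + (k - min (n - 1) k) := by omega
        have hsplit : List.range' (j + 1) k
            = List.range' (j + 1) (min (n - 1) k)
              ++ List.range' (j + 1 + min (n - 1) k) (k - min (n - 1) k) := by
          conv_lhs => rw [hm]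
          exact List.range'_append_1.symm
        rw [hsplit, List.filter_append, List.foldl_append]
        have hskip : (List.filter (fun x => decide (g <+: cs.drop x))
              (List.range' (j + 1) (min (n - 1) k))).foldl
            (fun (st : Int × Int) (x : Nat) => pvSelStep (n : Int) st ↑x) (c + 1, (j : Int) + n)
            = (c + 1, (j : Int) + n) := by
          apply pvSel_skip
          intro x hx
          have := List.mem_range'_1.mp (List.mem_of_mem_filter hx)
          omega
        rw [hskip]
        have hlen : g.length ≤ (cs.drop j).length := hp.length_le
        rw [List.length_drop] at hlen
        have hcnt : pvCnt g (cs.drop j) = pvCnt g (cs.drop (j + n)) + 1 := by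
          rw [pvCnt_prefix g _ (by intro h; rw [h] at hg; simp at hg; omega) hp,
            List.drop_drop, hg, Nat.add_comm]
        by_cases hkn : n - 1 ≤ k
        · have hmin : min (n - 1) k = n - 1 := by omega
          have hstart : j + 1 + min (n - 1) k = j + n := by omega
          rw [hmin] at hstart ⊢
          rw [hstart]
          rw [ih (k - (n - 1)) (by omega) (j + n) (c + 1) _ (by omega)
            (by omega)]
          omega
        · have hmin : min (n - 1) k = k := by omega
          rw [hmin]
          simp only [Nat.sub_self, List.range', List.filter_nil, List.foldl_nil]
          have : pvCnt g (cs.drop (j + n)) = 0 :=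
            pvCnt_of_short g _ (by rw [List.length_drop]; omega)
          rw [hcnt, this]; omega
      · rw [if_neg (by simpa using hp)]
        rw [ih k (by omega) (j + 1) c thr (by push_cast; omega) (by omega)]
        rw [pvCnt_not_prefix g _ hp, List.tail_drop]

-- the degenerate gram size 0: every position fires
theorem pvSelAll (k : Nat) : ∀ (j : Nat) (c thr : Int), thr ≤ (j : Int) →
    ((List.range' j k).foldl (fun (st : Int × Int) (x : Nat) => pvSelStep 0 st ↑x) (c, thr)).1 = c + k := by
  induction k with
  | zero => intro j c thr _; simp
  | succ k ih =>
    intro j c thr hthr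
    rw [List.range'_succ, List.foldl_cons]
    have : pvSelStep 0 (c, thr) ↑j = (c + 1, (j : Int)) := by
      simp only [pvSelStep]; rw [if_pos hthr]; simp
    rw [this, ih (j + 1) (c + 1) _ (by push_cast; omega)]
    omega

theorem pvBeq_eq_decide (a b : String) : (a == b) = decide (a.toList = b.toList) := by
  by_cases h : a.toList = b.toList
  · simp [String.toList_inj.mp h]
  · simp [h]; intro he; exact h (by rw [he])

theorem pvPyRange_nonpos (t : Int) (h : t ≤ 0) : PySem.List.pyRange 0 t 1 = [] := by
  simp [PySem.List.pyRange, show ¬ (0:Int) < t from by omega]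

-- the slice positions A and B both loop over, as a mapped List.range
theorem pvPos_eq (s : String) (nb : Int) (h0 : 0 ≤ nb) :
    PySem.List.pyRange 0 (PySem.Str.len s - nb + 1) 1
      = (List.range (s.toList.length + 1 - nb.toNat)).map (fun x : Nat => (x : Int)) := by
  have hnb : (nb.toNat : Int) = nb := Int.toNat_of_nonneg h0
  by_cases hle : nb.toNat ≤ s.toList.length
  · have h1 : PySem.Str.len s - nb + 1 = ((s.toList.length + 1 - nb.toNat : Nat) : Int) := by
      simp only [PySem.Str.len]; omega
    rw [h1, PySem.List.pyRange_zero_natCast]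
  · have h1 : s.toList.length + 1 - nb.toNat = 0 := by omega
    rw [h1, pvPyRange_nonpos _ (by simp only [PySem.Str.len]; omega)]
    simp

-- the centerpiece: B's dict after its pass maps every gram of length nb to str.count
theorem pvGetD_eq_count (s : String) (nb : Int) (h0 : 0 ≤ nb) (g : String)
    (hg : g.toList.length = nb.toNat) :
    (pvGreedyCounts s nb).getD g 0 = (PySem.Str.count s g : Int) := by
  have hnb : ((nb.toNat : Nat) : Int) = nb := Int.toNat_of_nonneg h0
  have hfold : pvGreedyCounts s nb
      = ((PySem.List.pyRange 0 (PySem.Str.len s - nb + 1) 1).foldl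
          (pvDStep (fun x => PySem.Str.slice s (some x) (some (x + nb))) nb)
          (PySem.Dict.empty, PySem.Dict.empty)).1 := rfl
  rw [hfold]
  have hinv := congrArg Prod.fst (pvDictInv
    (fun x => PySem.Str.slice s (some x) (some (x + nb))) nb
    (PySem.List.pyRange 0 (PySem.Str.len s - nb + 1) 1)
    (PySem.Dict.empty, PySem.Dict.empty) g)
  simp only at hinv
  rw [hinv]
  have hempty : ((PySem.Dict.empty : PySem.Dict String Int).getD g 0,
      (PySem.Dict.empty : PySem.Dict String Int).getD g 0) = ((0 : Int), (0 : Int)) := rfl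
  rw [hempty, pvPos_eq s nb h0, List.filter_map, List.foldl_map]
  rw [PySem.Str.count_eq]
  set cs := s.toList with hcs
  set n := nb.toNat with hn
  by_cases hn1 : 1 ≤ n
  · -- grams of positive size: the filter predicate is exactly "g occurs at x"
    have hgne : g.toList ≠ [] := by
      intro h; rw [h] at hg; simp at hg; omega
    have hfc : List.filter
          ((fun x : Int => PySem.Str.slice s (some x) (some (x + nb)) == g)
            ∘ (fun x : Nat => (x : Int))) (List.range (cs.length + 1 - n))
        = List.filter (fun x : Nat => decide (g.toList <+: cs.drop x))
            (List.range (cs.length + 1 - n)) := by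
      apply List.filter_congr
      intro x hx
      have hxlt : x < cs.length + 1 - n := List.mem_range.mp hx
      simp only [Function.comp]
      rw [pvBeq_eq_decide, PySem.Str.toList_slice]
      have hb : ((x : Int) + nb) = ((x + n : Nat) : Int) := by push_cast; omega
      rw [hb]
      have hslice : PySem.Chars.slice cs (some (x : Int)) (some ((x + n : Nat) : Int))
          = (cs.drop x).take n := by
        rw [PySem.Chars.slice_eq_listSlice, PySem.List.slice_natCast]
        congr 1
        omega
      rw [hslice]
      by_cases hpre : g.toList <+: cs.drop x
      · have : (cs.drop x).take n = g.toList := by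
          have := List.prefix_iff_eq_take.mp hpre
          rw [← hg]; exact this.symm
        simp [this, hpre]
      · have : ¬ (cs.drop x).take n = g.toList := by
          intro he
          apply hpre
          rw [List.prefix_iff_eq_take, hg]
          exact he.symm
        simp [this, hpre]
    rw [hfc, List.range_eq_range']
    rw [show (fun (st : Int × Int) (x : Nat) => pvSelStep nb st ↑x)
        = (fun (st : Int × Int) (x : Nat) => pvSelStep ((n : Nat) : Int) st ↑x) by rw [hnb]]
    rw [pvGreedyEq cs g.toList n hn1 hg (cs.length + 1 - n) 0 0 0 (by omega) (by omega)]
    rw [List.drop_zero, pvCount_eq_pvCnt cs g.toList hgne]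
    omega
  · -- nb = 0: the only gram is "", every position fires, count "" = len + 1
    have hn0 : n = 0 := by omega
    have hgnil : g.toList = [] := List.length_eq_zero_iff.mp (by omega)
    have hfc : List.filter
          ((fun x : Int => PySem.Str.slice s (some x) (some (x + nb)) == g)
            ∘ (fun x : Nat => (x : Int))) (List.range (cs.length + 1 - n))
        = List.range (cs.length + 1 - n) := by
      rw [List.filter_eq_self]
      intro x hx
      simp only [Function.comp]
      rw [pvBeq_eq_decide, PySem.Str.toList_slice, hgnil]
      have hb : ((x : Int) + nb) = ((x : Nat) : Int) := by omega
      rw [hb]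
      have h3 : PySem.List.slice s.toList (some ((x : Nat) : Int)) (some ((x : Nat) : Int))
          = [] := by
        rw [PySem.List.slice_natCast]; simp
      simp [h3]
    rw [hfc, List.range_eq_range']
    rw [show (fun (st : Int × Int) (x : Nat) => pvSelStep nb st ↑x)
        = (fun (st : Int × Int) (x : Nat) => pvSelStep 0 st ↑x) by rw [← hnb, hn0]; norm_num]
    rw [pvSelAll (cs.length + 1 - n) 0 0 0 le_rfl]
    rw [hgnil, pvCount_nil]
    omega

-- keys of B's counts dict = A's set of grams (same list, same first-occurrence order)
theorem pvKeys_eq (s : String) (nb : Int) (h0 : 0 ≤ nb) :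
    (pvGreedyCounts s nb).keys
      = PySem.Set.ofList ((PySem.List.pyRange 0 (PySem.Str.len s - nb + 1) 1).map
          (fun x => PySem.Str.slice s (some x) (some (x + nb)))) := by
  have hx : ∀ x ∈ PySem.List.pyRange 0 (PySem.Str.len s - nb + 1) 1, (0:Int) ≤ x := by
    intro x hx
    rw [pvPos_eq s nb h0] at hx
    obtain ⟨k, _, rfl⟩ := List.mem_map.mp hx
    exact Int.natCast_nonneg k
  have h := (pvDictKeys (fun x => PySem.Str.slice s (some x) (some (x + nb))) nb
    (PySem.List.pyRange 0 (PySem.Str.len s - nb + 1) 1)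
    (PySem.Dict.empty, PySem.Dict.empty) rfl hx).1
  exact h

-- every member of A's gram set has length nb
theorem pvMem_len (s : String) (nb : Int) (h0 : 0 ≤ nb) (k : String)
    (hk : k ∈ PySem.Set.ofList ((PySem.List.pyRange 0 (PySem.Str.len s - nb + 1) 1).map
          (fun x => PySem.Str.slice s (some x) (some (x + nb))))) :
    k.toList.length = nb.toNat := by
  have hnb : ((nb.toNat : Nat) : Int) = nb := Int.toNat_of_nonneg h0
  rw [PySem.Set.mem_ofList] at hk
  obtain ⟨x, hxm, rfl⟩ := List.mem_map.mp hk
  rw [pvPos_eq s nb h0] at hxm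
  obtain ⟨xN, hxN, rfl⟩ := List.mem_map.mp hxm
  have hxlt : xN < s.toList.length + 1 - nb.toNat := List.mem_range.mp hxN
  rw [PySem.Str.toList_slice]
  have hb : ((xN : Int) + nb) = ((xN + nb.toNat : Nat) : Int) := by push_cast; omega
  rw [hb, PySem.Chars.slice_eq_listSlice, PySem.List.slice_natCast]
  simp only [List.length_take, List.length_drop]
  omega

-- ===== VERDICT (by name: the statement is the Claim_ definition above) =====
theorem get_score_nb_letters_spec : Claim_equal_get_score_nb_letters := by
  intro p w nb _ hpre
  unfold Spec_get_score_nb_letters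
  have h0 : (0:Int) ≤ nb := hpre
  show get_score_nb_letters p w nb = get_score_nb_letters_alt p w nb
  unfold get_score_nb_letters get_score_nb_letters_alt
  simp only []
  have hnd : (pvGreedyCounts p nb).keys.Nodup := by
    rw [pvKeys_eq p nb h0]; exact PySem.Set.nodup_ofList _
  rw [PySem.Dict.items_eq_map_keys _ hnd 0, pvKeys_eq p nb h0, List.foldl_map]
  apply PySem.List.foldl_congr_mem
  intro acc k hk
  have hlen := pvMem_len p nb h0 k hk
  rw [pvGetD_eq_count p nb h0 k hlen, pvGetD_eq_count w nb h0 k hlen, min_comm]
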